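-- pv_equiv track=rewrite | github.com/vvhiteboard/algorithm | dragoncurve/main.py | how_many_rectangle
-- ===== SOURCE A (Python) =====
-- def how_many_rectangle(dragon):
--     count = 0
--     for x in range(100):
--         for y in range(100):
--             rectangle = set([(x, y), (x+1, y), (x, y+1), (x+1, y+1)])
--             if rectangle.issubset(dragon):
--                 count += 1
--
--     return count
-- ===== SOURCE B (Python) =====
-- def how_many_rectangle(dragon):
--     pts = set(dragon)
--     count = 0
--     for (x, y) in pts:
--         if 0 <= x < 100 and 0 <= y < 100 \
--            and (x + 1, y) in pts and (x, y + 1) in pts and (x + 1, y + 1) in pts: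
--             count += 1
--     return count
-- ===== Notes on version B (the rewrite author's own statement) =====
-- stated objective: faster
-- what changed: Instead of scanning the fixed 100x100 grid and testing each 4-corner set against the dragon list, B builds a hash set of the points once and iterates over the distinct points as candidate bottom-left corners with O(1) membership tests.
import Mathlib
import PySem

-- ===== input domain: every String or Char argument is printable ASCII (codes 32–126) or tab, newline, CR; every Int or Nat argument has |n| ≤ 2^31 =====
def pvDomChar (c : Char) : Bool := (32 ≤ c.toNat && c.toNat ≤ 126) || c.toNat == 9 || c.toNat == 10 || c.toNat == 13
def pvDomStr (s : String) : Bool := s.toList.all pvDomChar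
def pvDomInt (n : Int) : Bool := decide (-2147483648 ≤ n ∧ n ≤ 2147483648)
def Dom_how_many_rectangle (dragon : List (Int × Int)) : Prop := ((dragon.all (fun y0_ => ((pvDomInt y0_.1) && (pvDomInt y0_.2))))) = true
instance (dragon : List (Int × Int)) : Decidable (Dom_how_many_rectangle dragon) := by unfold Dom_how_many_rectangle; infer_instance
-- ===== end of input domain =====

-- B replaces A's fixed 100x100 grid scan (list membership per corner) by one pass over the
-- distinct points as candidate bottom-left corners with set membership tests (faster).


-- ===== PORT A =====
def how_many_rectangle (dragon : List (Int × Int)) : Int :=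
  (PySem.List.pyRange 0 100 1).foldl (fun count x =>
    (PySem.List.pyRange 0 100 1).foldl (fun count y =>
      if (x, y) ∈ dragon ∧ (x + 1, y) ∈ dragon ∧ (x, y + 1) ∈ dragon ∧ (x + 1, y + 1) ∈ dragon
      then count + 1 else count) count) 0

-- ===== PORT B =====
def how_many_rectangle_alt (dragon : List (Int × Int)) : Int :=
  let pts : PySem.Set (Int × Int) := PySem.Set.ofList dragon
  pts.foldl (fun count p =>
    if 0 ≤ p.1 ∧ p.1 < 100 ∧ 0 ≤ p.2 ∧ p.2 < 100 ∧
       (p.1 + 1, p.2) ∈ pts ∧ (p.1, p.2 + 1) ∈ pts ∧ (p.1 + 1, p.2 + 1) ∈ pts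
    then count + 1 else count) 0

-- ===== PRECONDITION & SPEC =====
def Spec_how_many_rectangle (dragon : List (Int × Int)) (out : Int) : Prop := out = how_many_rectangle_alt dragon
instance (dragon : List (Int × Int)) (out : Int) : Decidable (Spec_how_many_rectangle dragon out) := by unfold Spec_how_many_rectangle; infer_instance

-- ===== CLAIM (what is proved, stated in full; the proofs are below) =====
def Claim_equal_how_many_rectangle : Prop := ∀ (dragon : List (Int × Int)), Dom_how_many_rectangle dragon → Spec_how_many_rectangle dragon (how_many_rectangle dragon)

-- ===== LEMMAS AND PROOFS =====

-- the grid of corners A scans, as one flat list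
def pvGrid : List (Int × Int) :=
  (PySem.List.pyRange 0 100 1).flatMap (fun x => (PySem.List.pyRange 0 100 1).map (fun y => (x, y)))

theorem pvGrid_nodup : pvGrid.Nodup := by
  unfold pvGrid
  rw [List.nodup_flatMap]
  refine ⟨fun x _ => ?_, ?_⟩
  · exact (PySem.List.nodup_pyRange_one 0 100).map (fun a b h => by simpa using h)
  · refine (PySem.List.nodup_pyRange_one 0 100).imp (fun {a b} hne => ?_)
    intro q hqa hqb
    simp only [List.mem_map] at hqa hqb
    obtain ⟨y1, _, rfl⟩ := hqa
    obtain ⟨y2, _, h2⟩ := hqb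
    exact hne (by simpa using congrArg Prod.fst h2.symm)

theorem mem_pvGrid (q : Int × Int) :
    q ∈ pvGrid ↔ (0 ≤ q.1 ∧ q.1 < 100) ∧ (0 ≤ q.2 ∧ q.2 < 100) := by
  unfold pvGrid
  simp only [List.mem_flatMap, List.mem_map, PySem.List.mem_pyRange_one]
  constructor
  · rintro ⟨x, hx, y, hy, rfl⟩; exact ⟨hx, hy⟩
  · rintro ⟨hx, hy⟩; exact ⟨q.1, hx, q.2, hy, rfl⟩

theorem pv_sum_countP (l r : List Int) (p : Int → Int → Prop) [∀ x y, Decidable (p x y)] :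
    (l.map (fun x => ((r.countP (fun y => decide (p x y)) : Nat) : Int))).sum =
      ((l.flatMap (fun x => r.map (fun y => (x, y)))).countP
        (fun q => decide (p q.1 q.2)) : Nat) := by
  induction l with
  | nil => simp
  | cons a t ih =>
    simp only [List.map_cons, List.sum_cons, List.flatMap_cons, List.countP_append, ih,
      List.countP_map]
    have hc : ((fun q : Int × Int => decide (p q.1 q.2)) ∘ fun y => (a, y)) =
        (fun y => decide (p a y)) := rfl
    rw [hc]
    push_cast
    ring

theorem pv_A_eq (dragon : List (Int × Int)) :
    how_many_rectangle dragon =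
      (pvGrid.countP (fun q =>
        decide ((q.1, q.2) ∈ dragon ∧ (q.1 + 1, q.2) ∈ dragon ∧
          (q.1, q.2 + 1) ∈ dragon ∧ (q.1 + 1, q.2 + 1) ∈ dragon)) : Nat) := by
  unfold how_many_rectangle
  have h1 : ∀ (x : Int) (c : Int),
      (PySem.List.pyRange 0 100 1).foldl (fun count y =>
        if (x, y) ∈ dragon ∧ (x + 1, y) ∈ dragon ∧ (x, y + 1) ∈ dragon ∧ (x + 1, y + 1) ∈ dragon
        then count + 1 else count) c
      = c + ((PySem.List.pyRange 0 100 1).countP (fun y =>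
          decide ((x, y) ∈ dragon ∧ (x + 1, y) ∈ dragon ∧ (x, y + 1) ∈ dragon ∧
            (x + 1, y + 1) ∈ dragon)) : Nat) := by
    intro x c
    exact PySem.List.foldl_ite_add_one _ _ c
  simp only [h1]
  rw [PySem.List.foldl_add]
  rw [zero_add]
  rw [pv_sum_countP (PySem.List.pyRange 0 100 1) (PySem.List.pyRange 0 100 1)
    (fun x y => (x, y) ∈ dragon ∧ (x + 1, y) ∈ dragon ∧ (x, y + 1) ∈ dragon ∧
      (x + 1, y + 1) ∈ dragon)]
  rfl

theorem pv_B_eq (dragon : List (Int × Int)) :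
    how_many_rectangle_alt dragon =
      ((PySem.Set.ofList dragon).countP (fun q =>
        decide (0 ≤ q.1 ∧ q.1 < 100 ∧ 0 ≤ q.2 ∧ q.2 < 100 ∧
          (q.1 + 1, q.2) ∈ PySem.Set.ofList dragon ∧ (q.1, q.2 + 1) ∈ PySem.Set.ofList dragon ∧
          (q.1 + 1, q.2 + 1) ∈ PySem.Set.ofList dragon)) : Nat) := by
  unfold how_many_rectangle_alt
  rw [PySem.List.foldl_ite_add_one]
  rw [zero_add]

-- ===== VERDICT (by name: the statement is the Claim_ definition above) =====
theorem how_many_rectangle_spec : Claim_equal_how_many_rectangle := by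
  intro dragon _
  unfold Spec_how_many_rectangle
  rw [pv_A_eq, pv_B_eq]
  congr 1
  rw [List.countP_eq_length_filter, List.countP_eq_length_filter]
  apply List.Perm.length_eq
  rw [List.perm_ext_iff_of_nodup (pvGrid_nodup.filter _) ((PySem.Set.nodup_ofList dragon).filter _)]
  intro q
  simp only [List.mem_filter, mem_pvGrid, PySem.Set.mem_ofList, decide_eq_true_eq, Prod.mk.eta]
  tauto
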